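-- pv_equiv track=rewrite | github.com/bradwyatt/LevelEditor | leveleditor.py | snap_to_grid
-- ===== SOURCE A (Python) =====
-- def snap_to_grid(pos, screen_width, screen_height):
--     best_num_x, best_num_y = 0, 48 # Y is 48 so it doesn't go above the menu
--     for x_coord in range(0, screen_width, 24):
--         if pos[0]-x_coord <= 24 and pos[0]-x_coord >= 0:
--             best_num_x = x_coord
--     for y_coord in range(48, screen_height, 24):
--         if pos[1]-y_coord <= 24 and pos[1]-y_coord >= 0:
--             best_num_y = y_coord
--     return (best_num_x, best_num_y)
-- ===== SOURCE B (Python) =====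
-- def snap_to_grid(pos, screen_width, screen_height):
--     def snap(p, lo, hi, default):
--         # Grid lines are lo, lo+24, ... below hi.  Take the nearest grid line at
--         # or below p, clamp it to the last grid line on screen, and keep it only
--         # if it is still within one cell of p; otherwise fall back to default.
--         if hi <= lo:
--             return default
--         last = lo + ((hi - 1 - lo) // 24) * 24
--         c = min(lo + ((p - lo) // 24) * 24, last)
--         return c if lo <= c and p - 24 <= c <= p else default
--     return (snap(pos[0], 0, screen_width, 0), snap(pos[1], 48, screen_height, 48))
-- ===== Notes on version B (the rewrite author's own statement) =====
-- stated objective: alternative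
-- what changed: Replaces A's two linear scans over every 24px grid line of the screen by a direct constant-time snap: nearest grid line at or below the point, clamped to the last on-screen grid line, kept only if within one cell of the point; Pre_ excludes pos with fewer than 2 elements, on which A raises IndexError except when both ranges are empty and it returns the defaults without reading pos.
-- outside the precondition, e.g. on snap_to_grid((), 0, 0): A returns (0, 48), B raises IndexError
import Mathlib
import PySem

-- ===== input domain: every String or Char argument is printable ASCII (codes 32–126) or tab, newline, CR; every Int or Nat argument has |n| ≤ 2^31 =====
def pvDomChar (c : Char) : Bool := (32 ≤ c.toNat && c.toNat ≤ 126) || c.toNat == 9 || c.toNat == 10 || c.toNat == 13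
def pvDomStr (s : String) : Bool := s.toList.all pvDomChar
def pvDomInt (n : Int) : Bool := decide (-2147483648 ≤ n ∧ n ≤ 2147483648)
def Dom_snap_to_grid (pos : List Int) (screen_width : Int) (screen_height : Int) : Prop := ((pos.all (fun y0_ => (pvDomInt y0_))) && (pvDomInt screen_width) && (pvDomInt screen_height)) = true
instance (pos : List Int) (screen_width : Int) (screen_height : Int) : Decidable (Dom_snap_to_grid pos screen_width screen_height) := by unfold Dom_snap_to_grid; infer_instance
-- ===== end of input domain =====

-- B replaces A's two linear scans over the 24px grid lines by a direct constant-time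
-- snap: nearest grid line at or below the point, clamped to the last on-screen line,
-- kept only if within one cell of the point (alternative algorithm; a timing run
-- did not measure it faster on its generated inputs).


-- ===== PORT A =====
def snap_to_grid (pos : List Int) (screen_width : Int) (screen_height : Int) : List Int :=
  -- best_num_x, best_num_y = 0, 48
  -- for x_coord in range(0, screen_width, 24): if pos[0]-x_coord <= 24 and pos[0]-x_coord >= 0: best_num_x = x_coord
  let p0 := (PySem.List.pyGet? pos 0).getD 0  -- pos[0]; Pre_ guarantees it exists
  let p1 := (PySem.List.pyGet? pos 1).getD 0  -- pos[1]; Pre_ guarantees it exists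
  let best_num_x := (PySem.List.pyRange 0 screen_width 24).foldl
    (fun b x_coord => if p0 - x_coord ≤ 24 ∧ p0 - x_coord ≥ 0 then x_coord else b) 0
  let best_num_y := (PySem.List.pyRange 48 screen_height 24).foldl
    (fun b y_coord => if p1 - y_coord ≤ 24 ∧ p1 - y_coord ≥ 0 then y_coord else b) 48
  [best_num_x, best_num_y]

-- ===== PORT B =====
-- snap: nearest grid line at or below p, clamped to the last on-screen line,
-- kept only if still within one cell of p; else the default.
def snapCell (p lo hi default : Int) : Int :=
  if hi ≤ lo then default
  else
    let last := lo + (PySem.Int.floordiv (hi - 1 - lo) 24) * 24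
    let c := min (lo + (PySem.Int.floordiv (p - lo) 24) * 24) last
    if lo ≤ c ∧ p - 24 ≤ c ∧ c ≤ p then c else default

def snap_to_grid_alt (pos : List Int) (screen_width : Int) (screen_height : Int) : List Int :=
  [snapCell ((PySem.List.pyGet? pos 0).getD 0) 0 screen_width 0,
   snapCell ((PySem.List.pyGet? pos 1).getD 0) 48 screen_height 48]

-- ===== PRECONDITION & SPEC =====
-- Pre_ excludes lists with fewer than 2 elements: on them Python A raises IndexError whenever either
-- grid range is non-empty, and only when both ranges are empty (screen_width <= 0 and screen_height <= 48)
-- does A accidentally return the defaults (0, 48) without ever reading pos, where B still indexes pos and raises.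
def Pre_snap_to_grid (pos : List Int) (screen_width : Int) (screen_height : Int) : Prop :=
  2 ≤ pos.length
instance (pos : List Int) (screen_width : Int) (screen_height : Int) : Decidable (Pre_snap_to_grid pos screen_width screen_height) := by unfold Pre_snap_to_grid; infer_instance
def pvWitness_snap_to_grid : List Int × Int × Int := ([30, 70], 100, 200)

def Spec_snap_to_grid (pos : List Int) (screen_width : Int) (screen_height : Int) (out : List Int) : Prop := out = snap_to_grid_alt pos screen_width screen_height
instance (pos : List Int) (screen_width : Int) (screen_height : Int) (out : List Int) : Decidable (Spec_snap_to_grid pos screen_width screen_height out) := by unfold Spec_snap_to_grid; infer_instance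

-- ===== CLAIM (what is proved, stated in full; the proofs are below) =====
def Claim_equal_snap_to_grid : Prop := ∀ (pos : List Int) (screen_width : Int) (screen_height : Int), Dom_snap_to_grid pos screen_width screen_height → Pre_snap_to_grid pos screen_width screen_height → Spec_snap_to_grid pos screen_width screen_height (snap_to_grid pos screen_width screen_height)

-- ===== LEMMAS AND PROOFS =====

-- A's "last matching grid line wins" loop, over an explicit arithmetic progression,
-- in closed form.
theorem fold_snap_closed (p a d : Int) (N : Nat) :
    ((List.range N).map (fun k : Nat => a + 24 * (k : Int))).foldl
      (fun b x => if p - x ≤ 24 ∧ p - x ≥ 0 then x else b) d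
    = (if 0 ≤ (p - a) / 24 ∧ (p - a) / 24 < (N : Int) then a + 24 * ((p - a) / 24)
       else if (p - a) % 24 = 0 ∧ 0 ≤ (p - a) / 24 - 1 ∧ (p - a) / 24 - 1 < (N : Int) then
         a + 24 * ((p - a) / 24 - 1)
       else d) := by
  induction N with
  | zero => simp; split_ifs <;> omega
  | succ n ih =>
    rw [List.range_succ, List.map_append, List.foldl_append, ih]
    simp only [List.map_cons, List.map_nil, List.foldl_cons, List.foldl_nil]
    split_ifs <;> omega

theorem snap_to_grid_spec : Claim_equal_snap_to_grid := by
  intro pos w h _ hpre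
  unfold Spec_snap_to_grid
  simp only [snap_to_grid, snap_to_grid_alt, snapCell]
  rw [PySem.List.pyRange_of_pos 0 w (by norm_num : (0:Int) < 24),
      PySem.List.pyRange_of_pos 48 h (by norm_num : (0:Int) < 24)]
  rw [fold_snap_closed ((PySem.List.pyGet? pos 0).getD 0) 0 0,
      fold_snap_closed ((PySem.List.pyGet? pos 1).getD 0) 48 48]
  set p0 := (PySem.List.pyGet? pos 0).getD 0 with hp0
  set p1 := (PySem.List.pyGet? pos 1).getD 0 with hp1
  simp only [PySem.Int.floordiv]
  have hfd : ∀ x : Int, x.fdiv 24 = x / 24 := fun x => by rw [Int.fdiv_eq_ediv]; simp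
  simp only [hfd]
  congr 1
  · -- x component
    by_cases hw : 0 < w
    · simp only [if_pos hw, if_neg (by omega : ¬ w ≤ (0:Int))]
      split_ifs <;> omega
    · simp only [if_neg hw, if_pos (by omega : w ≤ (0:Int))]
      split_ifs <;> omega
  · -- y component
    congr 1
    by_cases hh : 48 < h
    · simp only [if_pos hh, if_neg (by omega : ¬ h ≤ (48:Int))]
      split_ifs <;> omega
    · simp only [if_neg hh, if_pos (by omega : h ≤ (48:Int))]
      split_ifs <;> omega
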